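-- pv_equiv track=rewrite | github.com/charles-v-phillips/leet_code_python | incomplete/sol_828_Count_Unique_Characters_Of_All_Substrings_Of_A_Given_string.py | uniqueLetterString
-- ===== SOURCE A (Python) =====
-- from collections import Counter, defaultdict
--
-- def uniqueLetterString(s: str):
--     total = 0
--     for i in range(0,len(s)):
--         for j in range(i+1,len(s) + 1):
--             c = Counter(s[i:j])
--             for k,v in c.items():
--                 if v == 1:
--                     total +=1
--
--     return total
-- ===== SOURCE B (Python) =====
-- def uniqueLetterString(s: str):
--     # Incremental sliding-end scan: for each start i, extend the substring one
--     # character at a time, maintaining char counts and the current number of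
--     # unique chars, instead of rebuilding a Counter per substring.
--     total = 0
--     n = len(s)
--     for i in range(n):
--         counts = {}
--         u = 0
--         for c in s[i:]:
--             v = counts.get(c, 0)
--             counts[c] = v + 1
--             if v == 0:
--                 u += 1
--             elif v == 1:
--                 u -= 1
--             total += u
--     return total
-- ===== Notes on version B (the rewrite author's own statement) =====
-- stated objective: faster
-- what changed: Instead of rebuilding a Counter from scratch for every substring s[i:j], B fixes the start i once and extends the end one character at a time, maintaining a count dict and the running number of unique characters incrementally.
import Mathlib
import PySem

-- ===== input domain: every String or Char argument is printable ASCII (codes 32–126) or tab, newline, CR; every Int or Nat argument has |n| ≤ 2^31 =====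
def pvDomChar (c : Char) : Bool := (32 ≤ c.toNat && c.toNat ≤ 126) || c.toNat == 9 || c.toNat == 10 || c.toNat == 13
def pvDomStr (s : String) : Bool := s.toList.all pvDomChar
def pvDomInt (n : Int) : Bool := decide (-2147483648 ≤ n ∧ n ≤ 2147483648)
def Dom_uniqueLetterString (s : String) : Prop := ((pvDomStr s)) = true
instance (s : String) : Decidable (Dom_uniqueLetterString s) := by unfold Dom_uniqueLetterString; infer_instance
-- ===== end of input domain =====

-- B replaces A's per-substring Counter rebuild by an incremental sliding-end scan per start
-- position that maintains char counts and the running unique count (objective: faster).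

-- ===== PORT A =====
def uniqueLetterString (s : String) : Int :=
  let cs := s.toList
  (PySem.List.pyRange 0 (cs.length : Int) 1).foldl (fun total i =>
    (PySem.List.pyRange (i + 1) ((cs.length : Int) + 1) 1).foldl (fun total j =>
      let c := PySem.Dict.counter (PySem.List.slice cs (some i) (some j))
      c.items.foldl (fun total kv => if kv.2 == 1 then total + 1 else total) total) total) 0

-- ===== PORT B =====
def uniqueLetterString_alt (s : String) : Int :=
  let cs := s.toList
  (PySem.List.pyRange 0 (cs.length : Int) 1).foldl (fun total i =>
    ((PySem.List.slice cs (some i) none).foldl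
      (fun (st : PySem.Dict Char Int × Int × Int) c =>
        let v := st.1.getD c 0
        let counts := st.1.insert c (v + 1)
        let u := st.2.1 + (if v == 0 then (1 : Int) else if v == 1 then -1 else 0)
        (counts, u, st.2.2 + u))
      (PySem.Dict.empty, 0, total)).2.2) 0

-- ===== PRECONDITION & SPEC =====
def Spec_uniqueLetterString (s : String) (out : Int) : Prop := out = uniqueLetterString_alt s
instance (s : String) (out : Int) : Decidable (Spec_uniqueLetterString s out) := by unfold Spec_uniqueLetterString; infer_instance

-- ===== CLAIM (what is proved, stated in full; the proofs are below) =====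
def Claim_equal_uniqueLetterString : Prop := ∀ (s : String), Dom_uniqueLetterString s → Spec_uniqueLetterString s (uniqueLetterString s)

-- ===== LEMMAS AND PROOFS =====

/-- Number of characters occurring exactly once in `l` (as an Int). -/
def pvUI (l : List Char) : Int := ((PySem.Set.ofList l).countP (fun k => l.count k == 1) : Int)

lemma pvA_add (l : List Char) (total : Int) :
    (PySem.Dict.counter l).items.foldl
      (fun total kv => if kv.2 == 1 then total + 1 else total) total = total + pvUI l := by
  rw [PySem.Dict.items_counter, List.foldl_map, PySem.List.foldl_if_add_one]
  unfold pvUI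
  congr 2
  apply List.countP_congr
  intro k _
  simp [beq_iff_eq, Nat.cast_eq_one]

lemma pvUI_append (l : List Char) (c : Char) :
    pvUI (l ++ [c]) = pvUI l +
      (if l.count c = 0 then (1 : Int) else if l.count c = 1 then -1 else 0) := by
  unfold pvUI
  have hset : PySem.Set.ofList (l ++ [c]) = PySem.Set.add (PySem.Set.ofList l) c := by
    rw [PySem.Set.ofList_eq_foldl, List.foldl_append, ← PySem.Set.ofList_eq_foldl]
    rfl
  by_cases h : c ∈ l
  · have hc1 : 1 ≤ l.count c := List.one_le_count_iff.mpr h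
    have hadd : PySem.Set.add (PySem.Set.ofList l) c = PySem.Set.ofList l := by
      simp [PySem.Set.add, PySem.Set.mem_ofList, h]
    rw [hset, hadd]
    have hmem : c ∈ PySem.Set.ofList l := (PySem.Set.mem_ofList _ _).mpr h
    have hperm := List.perm_cons_erase hmem
    have hnd := PySem.Set.nodup_ofList l
    rw [hperm.countP_eq (p := fun k => (l ++ [c]).count k == 1),
        hperm.countP_eq (p := fun k => l.count k == 1)]
    simp only [List.countP_cons]
    have herase : ∀ x ∈ (PySem.Set.ofList l).erase c,
        (((l ++ [c]).count x == 1) = true ↔ (l.count x == 1) = true) := by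
      intro x hx
      have hxne : x ≠ c := ((List.Nodup.mem_erase_iff hnd).mp hx).1
      simp [List.count_append, Ne.symm hxne]
    rw [List.countP_congr herase]
    have hcnew : ((l ++ [c]).count c == 1) = false := by
      simp [List.count_append]; omega
    rw [hcnew]
    by_cases h1 : l.count c = 1 <;> simp [h1] <;> omega
  · have hc0 : l.count c = 0 := List.count_eq_zero.mpr h
    have hadd : PySem.Set.add (PySem.Set.ofList l) c = PySem.Set.ofList l ++ [c] := by
      simp [PySem.Set.add, PySem.Set.mem_ofList, h]
    rw [hset, hadd, List.countP_append]
    have herase : ∀ x ∈ PySem.Set.ofList l,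
        (((l ++ [c]).count x == 1) = true ↔ (l.count x == 1) = true) := by
      intro x hx
      have hxl : x ∈ l := (PySem.Set.mem_ofList _ _).mp hx
      have hxne : x ≠ c := fun hxc => h (hxc ▸ hxl)
      simp [List.count_append, Ne.symm hxne]
    rw [List.countP_congr herase]
    simp [List.count_append, hc0]

lemma pvInner_spec (t : List Char) (pre : List Char) (acc : Int) :
    (t.foldl
      (fun (st : PySem.Dict Char Int × Int × Int) c =>
        let v := st.1.getD c 0
        let counts := st.1.insert c (v + 1)
        let u := st.2.1 + (if v == 0 then (1 : Int) else if v == 1 then -1 else 0)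
        (counts, u, st.2.2 + u))
      (pre.foldl (fun d x => d.insert x (d.getD x 0 + 1)) PySem.Dict.empty, pvUI pre, acc)).2.2
    = acc + ((List.range t.length).map (fun m => pvUI (pre ++ t.take (m + 1)))).sum := by
  induction t generalizing pre acc with
  | nil => simp
  | cons c t' ih =>
    have hd : (pre.foldl (fun d x => d.insert x (d.getD x 0 + 1)) PySem.Dict.empty).getD c 0
        = (pre.count c : Int) := by
      rw [PySem.Dict.foldl_insert_getD_add_one_eq_counter, PySem.Dict.getD_counter]
    have hstep :
        ((pre.foldl (fun d x => d.insert x (d.getD x 0 + 1)) PySem.Dict.empty).insert c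
            ((pre.count c : Int) + 1)
          = (pre ++ [c]).foldl (fun d x => d.insert x (d.getD x 0 + 1)) PySem.Dict.empty) := by
      rw [List.foldl_append, List.foldl_cons, List.foldl_nil, hd]
    have hu : pvUI pre + (if (pre.count c : Int) == 0 then (1 : Int)
        else if (pre.count c : Int) == 1 then -1 else 0) = pvUI (pre ++ [c]) := by
      rw [pvUI_append]
      congr 1
      simp [beq_iff_eq]
    simp only [List.foldl_cons, hd, hstep, hu]
    rw [ih (pre ++ [c]) (acc + pvUI (pre ++ [c]))]
    rw [List.length_cons, List.range_succ_eq_map]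
    simp only [List.map_cons, List.map_map, List.sum_cons]
    simp [List.append_assoc, add_assoc, Function.comp_def]

lemma pvStep_eq (cs : List Char) (i total : Int) (h0 : 0 ≤ i) (hn : i < (cs.length : Int)) :
    (PySem.List.pyRange (i + 1) ((cs.length : Int) + 1) 1).foldl (fun total j =>
      (PySem.Dict.counter (PySem.List.slice cs (some i) (some j))).items.foldl
        (fun total kv => if kv.2 == 1 then total + 1 else total) total) total
    = ((cs.drop i.toNat).foldl
        (fun (st : PySem.Dict Char Int × Int × Int) c =>
          let v := st.1.getD c 0
          let counts := st.1.insert c (v + 1)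
          let u := st.2.1 + (if v == 0 then (1 : Int) else if v == 1 then -1 else 0)
          (counts, u, st.2.2 + u))
        (PySem.Dict.empty, 0, total)).2.2 := by
  obtain ⟨ki, rfl⟩ : ∃ ki : Nat, i = (ki : Int) := ⟨i.toNat, (Int.toNat_of_nonneg h0).symm⟩
  have hki : ki < cs.length := by exact_mod_cast hn
  -- B side via the inner-loop invariant
  have hB := pvInner_spec (cs.drop ki) [] total
  simp only [List.foldl_nil, List.nil_append] at hB
  have hUInil : pvUI ([] : List Char) = 0 := by decide
  rw [hUInil] at hB
  rw [Int.toNat_natCast, hB]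
  -- A side: each inner step adds pvUI of the slice
  have hA : (fun (total : Int) (j : Int) =>
      (PySem.Dict.counter (PySem.List.slice cs (some (ki : Int)) (some j))).items.foldl
        (fun total kv => if kv.2 == 1 then total + 1 else total) total)
      = fun total j => total + pvUI (PySem.List.slice cs (some (ki : Int)) (some j)) := by
    funext total j; exact pvA_add _ _
  rw [hA, PySem.List.foldl_add]
  congr 1
  -- turn the j-range into a range over offsets
  have hrange : PySem.List.pyRange ((ki : Int) + 1) ((cs.length : Int) + 1) 1
      = (List.range (cs.length - ki)).map (fun k : Nat => ((ki + 1 + k : Nat) : Int)) := by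
    rw [PySem.List.pyRange_one]
    have h1 : ((cs.length : Int) + 1 - ((ki : Int) + 1)).toNat = cs.length - ki := by omega
    rw [h1]
    apply List.map_congr_left
    intro k _
    push_cast
    ring
  rw [hrange, List.map_map, List.length_drop]
  congr 1
  apply List.map_congr_left
  intro m _
  simp only [Function.comp]
  rw [PySem.List.slice_natCast]
  have h2 : ki + 1 + m - ki = m + 1 := by omega
  rw [h2]

-- ===== VERDICT (by name: the statement is the Claim_ definition above) =====
theorem uniqueLetterString_spec : Claim_equal_uniqueLetterString := by
  intro s _
  unfold Spec_uniqueLetterString uniqueLetterString uniqueLetterString_alt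
  apply PySem.List.foldl_congr_mem
  intro total i hi
  obtain ⟨h0, hn⟩ := (PySem.List.mem_pyRange_one).mp hi
  have hslice : PySem.List.slice s.toList (some i) none = s.toList.drop i.toNat :=
    PySem.List.slice_from _ h0
  rw [hslice]
  exact pvStep_eq s.toList i total h0 hn
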